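-- pv_equiv track=rewrite | github.com/beetrootfarmer/TIL | 함수 구현/1065_한수.py | findhan
-- ===== SOURCE A (Python) =====
-- def findhan(max):
--     han = 0 # 한수의 개수
--     k = 0
--     for t in range(100,max):
--         a = list()
--         while ( t > 0 ) : # 123을 넣었을 때
--             a.append(t % 10) # a[0]에 3이 담김
--             t //= 10 # t에 12가 들어감
--             #!!!!!!!파이썬에서 /=는 나눈 값 그대로 들어감 //=이게 몫만 들어감
--             k += 1 #a[1]에 t의 1의 자리수가 들어감
--         # 배열 a[0] a[1] a[2]를 비교하는 함수
--         if(a[0] - a[1] == a[1] - a[2]) :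
--             han += 1
--     return han
-- ===== SOURCE B (Python) =====
-- def findhan(max):
--     # Closed-form block counting: the test only depends on the last three digits,
--     # and each block of 1000 consecutive integers contains exactly 50 qualifying
--     # residues; only a tail of < 1000 residues is ever scanned.
--     if max <= 100:
--         return 0
--
--     def tail(m):
--         c = 0
--         for r in range(m):
--             if r % 10 - r // 10 % 10 == r // 10 % 10 - r // 100:
--                 c += 1
--         return c
--
--     def F(n):
--         return n // 1000 * 50 + tail(n % 1000)
--
--     return F(max) - F(100)
-- ===== Notes on version B (the rewrite author's own statement) =====
-- stated objective: faster
-- what changed: Replaces the per-number digit-extraction loop over all of [100,max) by a closed-form count: the arithmetic test depends only on the last three digits, each full block of 1000 contributes exactly 50, and only one tail of fewer than 1000 residues is scanned.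
import Mathlib
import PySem

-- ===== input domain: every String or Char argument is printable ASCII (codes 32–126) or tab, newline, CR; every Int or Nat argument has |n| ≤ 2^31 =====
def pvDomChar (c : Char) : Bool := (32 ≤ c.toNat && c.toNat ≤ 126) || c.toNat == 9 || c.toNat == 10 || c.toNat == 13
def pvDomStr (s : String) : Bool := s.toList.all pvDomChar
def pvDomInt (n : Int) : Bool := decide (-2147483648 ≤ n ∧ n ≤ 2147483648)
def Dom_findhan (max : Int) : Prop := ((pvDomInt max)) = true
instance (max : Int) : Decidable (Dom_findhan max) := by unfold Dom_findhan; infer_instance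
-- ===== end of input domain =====

-- B replaces A's per-number digit-extraction loop over [100,max) by block counting over
-- the last three digits (50 qualifying residues per block of 1000 plus a bounded tail).

-- ===== PORT A =====
-- A's inner `while (t > 0)` loop: appends t % 10, floor-divides t by 10, bumps k.
def findhanDig (t : Int) (a : List Int) (k : Int) : List Int × Int :=
  if h : t > 0 then
    findhanDig (PySem.Int.floordiv t 10) (a ++ [PySem.Int.mod t 10]) (k + 1)
  else (a, k)
termination_by t.toNat
decreasing_by
  rw [PySem.Int.floordiv_eq_ediv_of_pos (by norm_num : (0:Int) < 10)]; omega

-- A's loop body: state is (han, k); a[0]/a[1]/a[2] via pyGet? (every t here is ≥ 100,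
-- so the digit list has ≥ 3 entries and the `.getD 0` default is unreachable).
def findhanStep (s : Int × Int) (t : Int) : Int × Int :=
  let ak := findhanDig t [] s.2
  let a := ak.1
  if (PySem.List.pyGet? a 0).getD 0 - (PySem.List.pyGet? a 1).getD 0
       = (PySem.List.pyGet? a 1).getD 0 - (PySem.List.pyGet? a 2).getD 0
  then (s.1 + 1, ak.2) else (s.1, ak.2)

def findhan (max : Int) : Int :=
  ((PySem.List.pyRange 100 max 1).foldl findhanStep (0, 0)).1

-- ===== PORT B =====
-- Source B's tail(m): count r in range(m) with r%10 - r//10%10 == r//10%10 - r//100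
def findhanTail (m : Int) : Int :=
  (PySem.List.pyRange 0 m 1).foldl
    (fun c r =>
      if PySem.Int.mod r 10 - PySem.Int.mod (PySem.Int.floordiv r 10) 10
           = PySem.Int.mod (PySem.Int.floordiv r 10) 10 - PySem.Int.floordiv r 100
      then c + 1 else c) 0

-- Source B's F(n) = n // 1000 * 50 + tail(n % 1000)
def findhanF (n : Int) : Int :=
  PySem.Int.floordiv n 1000 * 50 + findhanTail (PySem.Int.mod n 1000)

def findhan_alt (max : Int) : Int :=
  if max ≤ 100 then 0 else findhanF max - findhanF 100

-- ===== PRECONDITION & SPEC =====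
def Spec_findhan (max : Int) (out : Int) : Prop := out = findhan_alt max
instance (max : Int) (out : Int) : Decidable (Spec_findhan max out) := by unfold Spec_findhan; infer_instance

-- ===== CLAIM (what is proved, stated in full; the proofs are below) =====
def Claim_equal_findhan : Prop := ∀ (max : Int), Dom_findhan max → Spec_findhan max (findhan max)

-- ===== LEMMAS AND PROOFS =====

-- the per-iteration test of A, with the digit list of t
abbrev PA (t : Int) : Prop :=
  (PySem.List.pyGet? (findhanDig t [] 0).1 0).getD 0
    - (PySem.List.pyGet? (findhanDig t [] 0).1 1).getD 0
  = (PySem.List.pyGet? (findhanDig t [] 0).1 1).getD 0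
    - (PySem.List.pyGet? (findhanDig t [] 0).1 2).getD 0

-- the per-iteration test of B
abbrev PB (r : Int) : Prop :=
  PySem.Int.mod r 10 - PySem.Int.mod (PySem.Int.floordiv r 10) 10
    = PySem.Int.mod (PySem.Int.floordiv r 10) 10 - PySem.Int.floordiv r 100

lemma dig_acc : ∀ (n : Nat) (t : Int), t.toNat ≤ n → ∀ (a : List Int) (k : Int),
    (findhanDig t a k).1 = a ++ (findhanDig t [] 0).1 := by
  intro n
  induction n with
  | zero =>
    intro t ht a k
    have hneg : ¬ t > 0 := by omega
    rw [findhanDig.eq_def, dif_neg hneg]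
    conv_rhs => rw [findhanDig.eq_def, dif_neg hneg]
    simp
  | succ n ih =>
    intro t ht a k
    by_cases hpos : t > 0
    · have hle : (PySem.Int.floordiv t 10).toNat ≤ n := by
        rw [PySem.Int.floordiv_eq_ediv_of_pos (by norm_num : (0:Int) < 10)]; omega
      rw [findhanDig.eq_def, dif_pos hpos, ih _ hle]
      conv_rhs => rw [findhanDig.eq_def, dif_pos hpos, ih _ hle]
      simp
    · rw [findhanDig.eq_def, dif_neg hpos]
      conv_rhs => rw [findhanDig.eq_def, dif_neg hpos]
      simp

lemma dig_acc' (t : Int) (a : List Int) (k : Int) :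
    (findhanDig t a k).1 = a ++ (findhanDig t [] 0).1 :=
  dig_acc t.toNat t le_rfl a k

lemma dig_cons (t : Int) (ht : t > 0) :
    (findhanDig t [] 0).1
      = PySem.Int.mod t 10 :: (findhanDig (PySem.Int.floordiv t 10) [] 0).1 := by
  rw [findhanDig.eq_def, dif_pos ht, dig_acc']
  simp

lemma fold_fst (l : List Int) : ∀ (h k : Int),
    (l.foldl findhanStep (h, k)).1
      = l.foldl (fun h t => if PA t then h + 1 else h) h := by
  induction l with
  | nil => intro h k; rfl
  | cons t l ih =>
    intro h k
    have hs : findhanStep (h, k) t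
        = ((if PA t then h + 1 else h), (findhanDig t [] k).2) := by
      show (if _ then _ else _) = _
      simp only [dig_acc' t [] k, List.nil_append]
      by_cases hc : PA t
      · rw [if_pos hc, if_pos hc]
      · rw [if_neg hc, if_neg hc]
    rw [List.foldl_cons, List.foldl_cons, hs, ih]

lemma findhan_eq (max : Int) :
    findhan max = (PySem.List.pyRange 100 max 1).foldl
      (fun h t => if PA t then h + 1 else h) 0 := by
  unfold findhan
  exact fold_fst _ 0 0

lemma fd10_pos (t : Int) (ht : 100 ≤ t) : PySem.Int.floordiv t 10 > 0 := by
  rw [PySem.Int.floordiv_eq_ediv_of_pos (by norm_num : (0:Int) < 10)]; omega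


lemma pyGetD0 (x y z : Int) (l : List Int) :
    (PySem.List.pyGet? (x :: y :: z :: l) 0).getD 0 = x := by
  simp [PySem.List.pyGet?, PySem.List.pyIdx?]
  rw [if_pos (by omega)]
  simp

lemma pyGetD1 (x y z : Int) (l : List Int) :
    (PySem.List.pyGet? (x :: y :: z :: l) 1).getD 0 = y := by
  simp [PySem.List.pyGet?, PySem.List.pyIdx?]
  rw [if_pos (by omega)]
  simp

lemma pyGetD2 (x y z : Int) (l : List Int) :
    (PySem.List.pyGet? (x :: y :: z :: l) 2).getD 0 = z := by
  simp [PySem.List.pyGet?, PySem.List.pyIdx?]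
  rw [if_pos (by omega)]
  simp

lemma PA_iff (t : Int) (ht : 100 ≤ t) : PA t ↔ PB (PySem.Int.mod t 1000) := by
  have h1 : t > 0 := by omega
  have h2 : PySem.Int.floordiv t 10 > 0 := fd10_pos t ht
  have h3 : PySem.Int.floordiv (PySem.Int.floordiv t 10) 10 > 0 := by
    rw [PySem.Int.floordiv_eq_ediv_of_pos (by norm_num : (0:Int) < 10),
        PySem.Int.floordiv_eq_ediv_of_pos (by norm_num : (0:Int) < 10)]
    omega
  unfold PA PB
  rw [dig_cons t h1, dig_cons _ h2, dig_cons _ h3,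
      pyGetD0, pyGetD1, pyGetD2]
  rw [PySem.Int.floordiv_eq_ediv_of_pos (b := 10) (by norm_num),
      PySem.Int.floordiv_eq_ediv_of_pos (b := 10) (by norm_num),
      PySem.Int.mod_eq_emod_of_pos (b := 10) (by norm_num),
      PySem.Int.mod_eq_emod_of_pos (b := 10) (by norm_num),
      PySem.Int.mod_eq_emod_of_pos (b := 10) (by norm_num),
      PySem.Int.mod_eq_emod_of_pos (b := 1000) (by norm_num)]
  rw [PySem.Int.mod_eq_emod_of_pos (b := 10) (by norm_num),
      PySem.Int.mod_eq_emod_of_pos (b := 10) (by norm_num),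
      PySem.Int.floordiv_eq_ediv_of_pos (b := 10) (by norm_num),
      PySem.Int.floordiv_eq_ediv_of_pos (b := 100) (by norm_num)]
  have e0 : t / 10 / 10 = t / 100 := by omega
  have e1 : t % 1000 % 10 = t % 10 := by omega
  have e2 : t % 1000 / 10 % 10 = t / 10 % 10 := by omega
  have e3 : t % 1000 / 100 = t / 100 % 10 := by omega
  rw [e0, e1, e2, e3]

lemma tail_succ (m : Int) (hm : 0 ≤ m) :
    findhanTail (m + 1) = findhanTail m + (if PB m then 1 else 0) := by
  unfold findhanTail
  rw [PySem.List.pyRange_one_succ_right hm, List.foldl_append]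
  simp only [List.foldl_cons, List.foldl_nil]
  split_ifs <;> omega

set_option maxHeartbeats 2000000 in
set_option maxRecDepth 100000 in
lemma tail_1000 : findhanTail 1000 = 50 := by decide

lemma tail_zero : findhanTail 0 = 0 := by decide

lemma F_succ (n : Int) (hn : 100 ≤ n) :
    findhanF (n + 1) = findhanF n + (if PB (PySem.Int.mod n 1000) then 1 else 0) := by
  unfold findhanF
  rw [PySem.Int.floordiv_eq_ediv_of_pos (b := 1000) (by norm_num),
      PySem.Int.floordiv_eq_ediv_of_pos (b := 1000) (by norm_num),
      PySem.Int.mod_eq_emod_of_pos (a := n + 1) (b := 1000) (by norm_num),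
      PySem.Int.mod_eq_emod_of_pos (a := n) (b := 1000) (by norm_num)]
  by_cases h999 : n % 1000 = 999
  · have hq : (n + 1) / 1000 = n / 1000 + 1 := by omega
    have hr : (n + 1) % 1000 = 0 := by omega
    rw [hq, hr, tail_zero, h999]
    have h50 := tail_succ 999 (by norm_num)
    norm_num at h50
    rw [tail_1000] at h50
    split_ifs at h50 ⊢ <;> omega
  · have hq : (n + 1) / 1000 = n / 1000 := by omega
    have hr : (n + 1) % 1000 = n % 1000 + 1 := by omega
    rw [hq, hr, tail_succ _ (by omega)]
    omega

lemma alt_eq (n : Int) (hn : 100 ≤ n) :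
    findhan_alt n = findhanF n - findhanF 100 := by
  unfold findhan_alt
  split_ifs with h
  · have : n = 100 := by omega
    subst this; omega
  · rfl

lemma main_ge (n : Int) (hn : 100 ≤ n) : findhan n = findhan_alt n := by
  induction n, hn using Int.le_induction with
  | base =>
    rw [findhan_eq, PySem.List.pyRange_one_eq_nil le_rfl]
    simp [findhan_alt]
  | succ n hn ih =>
    rw [findhan_eq, PySem.List.pyRange_one_succ_right (by omega : (100:Int) ≤ n),
        List.foldl_append, ← findhan_eq]
    simp only [List.foldl_cons, List.foldl_nil]
    rw [if_congr (PA_iff n hn) rfl rfl, ih,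
        alt_eq n hn, alt_eq (n + 1) (by omega), F_succ n hn]
    split_ifs <;> omega

-- ===== VERDICT (by name: the statement is the Claim_ definition above) =====
theorem findhan_spec : Claim_equal_findhan := by
  intro max _
  unfold Spec_findhan
  rcases le_or_gt max 100 with h | h
  · rw [findhan_eq, PySem.List.pyRange_one_eq_nil h]
    simp [findhan_alt, h]
  · exact main_ge max (by omega)
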